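-- pv_equiv track=rewrite | github.com/sungyubkim/nsys-ai | src/nsys_ai/skills/builtins/gpu_idle_gaps.py | _classify_gap_apis
-- ===== SOURCE A (Python) =====
-- _GAP_CLASSIFICATIONS = [
--     # (api_substring, category, description)
--     ("cudaDeviceSynchronize", "synchronization", "Explicit GPU sync stall"),
--     ("cudaStreamSynchronize", "synchronization", "Stream sync stall"),
--     ("cudaEventSynchronize", "synchronization", "Event sync stall"),
--     ("cudaMemcpyAsync", "memory_transfer", "Async memory transfer (non-blocking)"),
--     ("cudaMemcpy", "memory_transfer", "Blocked on memory transfer"),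
--     ("cudaMemsetAsync", "memory_transfer", "Async memory set (non-blocking)"),
--     ("cudaMemset", "memory_transfer", "Blocked on memory set"),
--     ("cudaLaunchKernel", "kernel_launch", "Kernel launch overhead"),
-- ]
--
-- def _classify_gap_apis(api_names: list[str]) -> tuple[str, str]:
--     """Classify a gap based on the dominant CUDA Runtime APIs observed.
--
--     Returns (category, description).
--     """
--     for api_sub, category, desc in _GAP_CLASSIFICATIONS:
--         for api in api_names:
--             if api_sub in api:
--                 return category, desc
--     if not api_names:
--         return "cpu_stall", "No CUDA API activity — possible DataLoader / GIL / I/O wait"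
--     return "unknown", "Unclassified CUDA API activity"
-- ===== SOURCE B (Python) =====
-- _GAP_CLASSIFICATIONS = [
--     # (api_substring, category, description)
--     ("cudaDeviceSynchronize", "synchronization", "Explicit GPU sync stall"),
--     ("cudaStreamSynchronize", "synchronization", "Stream sync stall"),
--     ("cudaEventSynchronize", "synchronization", "Event sync stall"),
--     ("cudaMemcpyAsync", "memory_transfer", "Async memory transfer (non-blocking)"),
--     ("cudaMemcpy", "memory_transfer", "Blocked on memory transfer"),
--     ("cudaMemsetAsync", "memory_transfer", "Async memory set (non-blocking)"),
--     ("cudaMemset", "memory_transfer", "Blocked on memory set"),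
--     ("cudaLaunchKernel", "kernel_launch", "Kernel launch overhead"),
-- ]
--
-- def _classify_gap_apis(api_names: list[str]) -> tuple[str, str]:
--     """Classify a gap: single pass over api_names maintaining the smallest
--     (highest-priority) matching classification index."""
--     best = None
--     for api in api_names:
--         idx = None
--         for i, (sub, _, _) in enumerate(_GAP_CLASSIFICATIONS):
--             if sub in api:
--                 idx = i
--                 break
--         if idx is not None and (best is None or idx < best):
--             best = idx
--     if best is not None:
--         _, category, desc = _GAP_CLASSIFICATIONS[best]
--         return category, desc
--     if not api_names:
--         return "cpu_stall", "No CUDA API activity — possible DataLoader / GIL / I/O wait"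
--     return "unknown", "Unclassified CUDA API activity"
-- ===== Notes on version B (the rewrite author's own statement) =====
-- stated objective: alternative
-- what changed: Replaces A's priority-ordered double loop with early return by a single pass over api_names that keeps the minimum matching classification index (first match per api), reading each api name once.
import Mathlib
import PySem

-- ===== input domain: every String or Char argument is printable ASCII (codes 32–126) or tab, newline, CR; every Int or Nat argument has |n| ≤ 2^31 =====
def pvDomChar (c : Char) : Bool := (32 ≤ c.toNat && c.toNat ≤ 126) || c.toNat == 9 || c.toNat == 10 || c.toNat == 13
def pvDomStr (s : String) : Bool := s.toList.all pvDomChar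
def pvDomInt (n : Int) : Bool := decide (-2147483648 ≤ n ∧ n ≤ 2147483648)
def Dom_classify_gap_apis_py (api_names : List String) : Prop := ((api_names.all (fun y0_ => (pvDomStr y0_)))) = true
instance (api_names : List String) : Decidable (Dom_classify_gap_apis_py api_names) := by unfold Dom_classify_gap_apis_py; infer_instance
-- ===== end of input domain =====

-- B replaces A's priority-ordered double loop (with early return) by one pass over
-- api_names that keeps the minimum matching classification index: alternative decomposition, same result.

def pvGapList : List (String × String × String) := [
  ("cudaDeviceSynchronize", "synchronization", "Explicit GPU sync stall"),
  ("cudaStreamSynchronize", "synchronization", "Stream sync stall"),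
  ("cudaEventSynchronize", "synchronization", "Event sync stall"),
  ("cudaMemcpyAsync", "memory_transfer", "Async memory transfer (non-blocking)"),
  ("cudaMemcpy", "memory_transfer", "Blocked on memory transfer"),
  ("cudaMemsetAsync", "memory_transfer", "Async memory set (non-blocking)"),
  ("cudaMemset", "memory_transfer", "Blocked on memory set"),
  ("cudaLaunchKernel", "kernel_launch", "Kernel launch overhead")]

-- ===== PORT A =====
-- A's inner loop: first api containing api_sub returns (category, desc)
def pvAInner (sub cat desc : String) : List String → Option (String × String)
  | [] => none
  | api :: rest => if PySem.Str.isIn sub api then some (cat, desc) else pvAInner sub cat desc rest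

-- A's outer loop over the classification list
def pvAOuter : List (String × String × String) → List String → Option (String × String)
  | [], _ => none
  | (sub, cat, desc) :: rest, apis =>
    match pvAInner sub cat desc apis with
    | some r => some r
    | none => pvAOuter rest apis

def classify_gap_apis_py (api_names : List String) : String × String :=
  match pvAOuter pvGapList api_names with
  | some r => r
  | none =>
    if api_names = [] then
      ("cpu_stall", "No CUDA API activity — possible DataLoader / GIL / I/O wait")
    else
      ("unknown", "Unclassified CUDA API activity")

-- ===== PORT B =====
-- index of the first classification whose substring occurs in api (Source B's enumerate/break loop)
def pvFirstIdx : List (String × String × String) → String → Option Nat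
  | [], _ => none
  | (sub, _, _) :: rest, api =>
    if PySem.Str.isIn sub api then some 0 else (pvFirstIdx rest api).map (· + 1)

-- Source B's body of 'for api in api_names': update best with idx when smaller
def pvBStep (best : Option Nat) (api : String) : Option Nat :=
  match pvFirstIdx pvGapList api with
  | none => best
  | some i =>
    match best with
    | none => some i
    | some b => if i < b then some i else some b

def classify_gap_apis_py_alt (api_names : List String) : String × String :=
  match api_names.foldl pvBStep none with
  | some i =>
    let t := pvGapList.getD i ("", "", "")
    (t.2.1, t.2.2)
  | none =>
    if api_names = [] then
      ("cpu_stall", "No CUDA API activity — possible DataLoader / GIL / I/O wait")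
    else
      ("unknown", "Unclassified CUDA API activity")

-- ===== PRECONDITION & SPEC =====
def Spec_classify_gap_apis_py (api_names : List String) (out : String × String) : Prop := out = classify_gap_apis_py_alt api_names
instance (api_names : List String) (out : String × String) : Decidable (Spec_classify_gap_apis_py api_names out) := by unfold Spec_classify_gap_apis_py; infer_instance

-- ===== CLAIM (what is proved, stated in full; the proofs are below) =====
def Claim_equal_classify_gap_apis_py : Prop := ∀ (api_names : List String), Dom_classify_gap_apis_py api_names → Spec_classify_gap_apis_py api_names (classify_gap_apis_py api_names)

-- ===== LEMMAS AND PROOFS =====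

-- minimum of two optional indices (none = "no match yet")
def pvOMin : Option Nat → Option Nat → Option Nat
  | none, b => b
  | some a, none => some a
  | some a, some b => some (min a b)

-- the minimum first-match index over a list of api names, for match function f
def pvM (f : String → Option Nat) : List String → Option Nat
  | [] => none
  | a :: as => pvOMin (f a) (pvM f as)

theorem pvBStep_eq (best : Option Nat) (api : String) :
    pvBStep best api = pvOMin best (pvFirstIdx pvGapList api) := by
  unfold pvBStep
  cases pvFirstIdx pvGapList api with
  | none => cases best <;> rfl
  | some i =>
    cases best with
    | none => rfl
    | some b =>
      simp only [pvOMin]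
      split_ifs with h <;> (congr 1; omega)

theorem pvOMin_none_right (a : Option Nat) : pvOMin a none = a := by cases a <;> rfl

theorem pvOMin_assoc (a b c : Option Nat) : pvOMin (pvOMin a b) c = pvOMin a (pvOMin b c) := by
  cases a <;> cases b <;> cases c <;> simp [pvOMin, Nat.min_assoc]

theorem pvFoldl_eq (apis : List String) : ∀ acc : Option Nat,
    apis.foldl pvBStep acc = pvOMin acc (pvM (pvFirstIdx pvGapList) apis) := by
  induction apis with
  | nil => intro acc; simp [List.foldl, pvM, pvOMin_none_right]
  | cons a as ih =>
    intro acc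
    simp only [List.foldl, pvM, ih, pvBStep_eq, pvOMin_assoc]

theorem pvAInner_eq (s c d : String) (apis : List String) :
    pvAInner s c d apis =
      (if apis.any (fun api => PySem.Str.isIn s api) then some (c, d) else none) := by
  induction apis with
  | nil => rfl
  | cons a as ih =>
    simp only [pvAInner, List.any_cons]
    by_cases h : PySem.Str.isIn s a = true
    · rw [if_pos h]
      simp only [h, Bool.true_or, reduceIte]
    · rw [if_neg h]
      simp only [Bool.eq_false_iff.mpr h, Bool.false_or]
      exact ih

theorem pvM_nilCls (apis : List String) : pvM (pvFirstIdx []) apis = none := by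
  induction apis with
  | nil => rfl
  | cons a as ih => rw [pvM, ih]; rfl

theorem pvM_zero (f : String → Option Nat) (apis : List String)
    (h : ∃ a ∈ apis, f a = some 0) : pvM f apis = some 0 := by
  induction apis with
  | nil => simp at h
  | cons a as ih =>
    rcases h with ⟨x, hx, hfx⟩
    rcases List.mem_cons.mp hx with rfl | hx'
    · cases hm : pvM f as <;> simp [pvM, hfx, hm, pvOMin]
    · cases hf : f a <;> simp [pvM, ih ⟨x, hx', hfx⟩, hf, pvOMin]

theorem pvM_shift (f g : String → Option Nat) (apis : List String)
    (h : ∀ a ∈ apis, f a = (g a).map (· + 1)) :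
    pvM f apis = (pvM g apis).map (· + 1) := by
  induction apis with
  | nil => rfl
  | cons a as ih =>
    have ha := h a (List.mem_cons_self ..)
    have ht := ih (fun x hx => h x (List.mem_cons_of_mem _ hx))
    simp only [pvM, ha, ht]
    cases g a <;> cases pvM g as <;> simp [pvOMin, Nat.succ_min_succ]

theorem pvMain (cls : List (String × String × String)) (apis : List String) :
    pvAOuter cls apis =
      (pvM (pvFirstIdx cls) apis).map (fun i => (cls.getD i ("", "", "")).2) := by
  induction cls with
  | nil => simp [pvAOuter, pvM_nilCls]
  | cons hd rest ih =>
    obtain ⟨s, c, d⟩ := hd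
    by_cases h : apis.any (fun api => PySem.Str.isIn s api) = true
    · rcases List.any_eq_true.mp h with ⟨x, hx, hsx⟩
      have hz : pvM (pvFirstIdx ((s, c, d) :: rest)) apis = some 0 :=
        pvM_zero _ _ ⟨x, hx, by rw [pvFirstIdx, if_pos hsx]⟩
      rw [pvAOuter, pvAInner_eq, if_pos h, hz]
      rfl
    · have hall : ∀ a ∈ apis, PySem.Str.isIn s a = false := by
        intro a ha
        cases hca : PySem.Str.isIn s a with
        | false => rfl
        | true => exact absurd (List.any_eq_true.mpr ⟨a, ha, hca⟩) h
      have hs : pvM (pvFirstIdx ((s, c, d) :: rest)) apis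
          = (pvM (pvFirstIdx rest) apis).map (· + 1) :=
        pvM_shift _ _ _ (fun a ha => by
          rw [pvFirstIdx, if_neg (by rw [hall a ha]; exact Bool.false_ne_true)])
      rw [pvAOuter, pvAInner_eq, if_neg h, ih, hs]
      cases pvM (pvFirstIdx rest) apis <;> rfl

-- ===== VERDICT (by name: the statement is the Claim_ definition above) =====
theorem classify_gap_apis_py_spec : Claim_equal_classify_gap_apis_py := by
  intro apis _
  unfold Spec_classify_gap_apis_py classify_gap_apis_py classify_gap_apis_py_alt
  rw [pvFoldl_eq, pvMain]
  cases pvM (pvFirstIdx pvGapList) apis with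
  | none => simp [pvOMin]
  | some i => simp [pvOMin]
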